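-- pv_equiv track=rewrite | github.com/arvinkent18/non_repeater | non_repeater.py | reorder_string
-- ===== SOURCE A (Python) =====
-- NO_OF_CHARS = 256
--
-- def get_char_count_array(string):
--     count = [0] * NO_OF_CHARS
--     for i in string:
--         count[ord(i)]+=1
--     return count
--
-- def reorder_string(string):
--     count = get_char_count_array(string)
--     char_list = []
--     found = 0
--
--     for i in string:
--         if count[ord(i)] == 1:
--             found += 1
--             if (found == 1):
--                 char_list.insert(0, i)
--             else:
--                 char_list.insert(found - 1, i)
--         else:
--             char_list.append(i)
--
--     return "" .join(char_list)
-- ===== SOURCE B (Python) =====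
-- def reorder_string(string):
--     count = {}
--     for c in string:
--         count[c] = count.get(c, 0) + 1
--     uniques = [c for c in string if count[c] == 1]
--     repeats = [c for c in string if count[c] != 1]
--     return "".join(uniques + repeats)
-- ===== Notes on version B (the rewrite author's own statement) =====
-- stated objective: simpler
-- what changed: Replaces the 256-slot ord-indexed count array and the positional insert(found-1)/append loop with a plain dict counter and two comprehensions (stable partition: uniques then repeats).
import Mathlib
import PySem

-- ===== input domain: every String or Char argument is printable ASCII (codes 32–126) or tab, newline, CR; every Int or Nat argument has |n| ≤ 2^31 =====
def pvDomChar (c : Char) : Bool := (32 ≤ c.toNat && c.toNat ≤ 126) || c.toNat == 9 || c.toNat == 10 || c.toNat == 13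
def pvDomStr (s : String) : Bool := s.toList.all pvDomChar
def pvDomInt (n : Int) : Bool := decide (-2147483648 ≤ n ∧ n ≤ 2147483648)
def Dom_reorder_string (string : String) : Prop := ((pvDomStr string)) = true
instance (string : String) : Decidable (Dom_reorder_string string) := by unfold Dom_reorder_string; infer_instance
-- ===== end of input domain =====

-- B replaces the ord-indexed count array and the positional insert/append loop by a dict
-- counter and two filter passes (uniques then repeats); objective: simpler.

-- ===== PORT A =====
def get_char_count_array (string : String) : List Int :=
  string.toList.foldl
    (fun count i => count.set i.toNat (count.getD i.toNat 0 + 1))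
    (List.replicate 256 0)

def reorder_string (string : String) : String :=
  let count := get_char_count_array string
  let st := string.toList.foldl
    (fun (st : List Char × Int) i =>
      if count.getD i.toNat 0 == 1 then
        let found := st.2 + 1
        if found == 1 then (PySem.List.insert st.1 0 i, found)
        else (PySem.List.insert st.1 (found - 1) i, found)
      else (st.1 ++ [i], st.2))
    ([], 0)
  String.ofList st.1

-- ===== PORT B =====
def reorder_string_alt (string : String) : String :=
  let count := string.toList.foldl
    (fun (d : PySem.Dict Char Int) c => d.insert c (d.getD c 0 + 1)) PySem.Dict.empty
  let uniques := string.toList.filter (fun c => count.getD c 0 == 1)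
  let repeats := string.toList.filter (fun c => count.getD c 0 != 1)
  String.ofList (uniques ++ repeats)

-- ===== PRECONDITION & SPEC =====
def Spec_reorder_string (string : String) (out : String) : Prop := out = reorder_string_alt string
instance (string : String) (out : String) : Decidable (Spec_reorder_string string out) := by unfold Spec_reorder_string; infer_instance

-- ===== CLAIM (what is proved, stated in full; the proofs are below) =====
def Claim_equal_reorder_string : Prop := ∀ (string : String), Dom_reorder_string string → Spec_reorder_string string (reorder_string string)

-- ===== LEMMAS AND PROOFS =====

-- the count array reads back the multiplicity of each in-range character
lemma arr_count (c : Char) :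
    ∀ (l : List Char) (init : List Int), c.toNat < init.length →
      (∀ x ∈ l, x.toNat < init.length) →
      (l.foldl (fun count i => count.set i.toNat (count.getD i.toNat 0 + 1)) init).getD c.toNat 0
        = init.getD c.toNat 0 + l.count c := by
  intro l
  induction l with
  | nil => intro init _ _; simp
  | cons i l ih =>
    intro init hc hl
    have hi : i.toNat < init.length := hl i (by simp)
    have hlen : (init.set i.toNat (init.getD i.toNat 0 + 1)).length = init.length := by simp
    rw [List.foldl_cons,
        ih _ (hlen ▸ hc) (fun x hx => hlen ▸ hl x (List.mem_cons_of_mem _ hx))]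
    by_cases h : i = c
    · subst h
      rw [List.getD_eq_getElem?_getD, List.getD_eq_getElem?_getD,
          List.getElem?_set_self hi, List.count_cons_self]
      simp only [Option.getD_some]
      push_cast
      ring
    · have hne : i.toNat ≠ c.toNat := fun h' => h (Char.ext_iff.mpr (UInt32.toNat_inj.mp h'))
      simp only [List.getD_eq_getElem?_getD]
      rw [List.getElem?_set_ne hne, List.count_cons_of_ne h]

-- the two counting structures agree on every character of the string
lemma counts_agree (s : String) (hs : pvDomStr s = true) (c : Char) (hc : c ∈ s.toList) :
    (get_char_count_array s).getD c.toNat 0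
      = (s.toList.foldl (fun (d : PySem.Dict Char Int) c => d.insert c (d.getD c 0 + 1))
          PySem.Dict.empty).getD c 0 := by
  have hdom : ∀ x ∈ s.toList, x.toNat < 256 := by
    intro x hx
    have := List.all_eq_true.mp hs x hx
    simp only [pvDomChar, Bool.or_eq_true, Bool.and_eq_true, decide_eq_true_eq,
      beq_iff_eq] at this
    omega
  have hc' : c.toNat < (List.replicate (256 : Nat) (0 : Int)).length := by
    rw [List.length_replicate]; exact hdom c hc
  rw [PySem.Dict.getD_foldl_insert_add_one]
  rw [get_char_count_array, arr_count c s.toList _ hc'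
        (fun x hx => by rw [List.length_replicate]; exact hdom x hx)]
  rw [PySem.Dict.getD_empty, List.getD, List.getElem?_replicate]
  simp [hdom c hc]

-- A's loop is a stable partition: uniques (in order) in front, repeats appended
lemma loopA_partition (count : List Int) :
    ∀ (l u r : List Char),
      (l.foldl (fun (st : List Char × Int) i =>
          if count.getD i.toNat 0 == 1 then
            if st.2 + 1 == 1 then (PySem.List.insert st.1 0 i, st.2 + 1)
            else (PySem.List.insert st.1 (st.2 + 1 - 1) i, st.2 + 1)
          else (st.1 ++ [i], st.2)) (u ++ r, (u.length : Int)))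
        = ((u ++ l.filter (fun c => count.getD c.toNat 0 == 1))
            ++ (r ++ l.filter (fun c => !(count.getD c.toNat 0 == 1))),
           ((u.length + (l.filter (fun c => count.getD c.toNat 0 == 1)).length : Nat) : Int)) := by
  intro l
  induction l with
  | nil => intro u r; simp
  | cons i l ih =>
    intro u r
    rw [List.foldl_cons]
    by_cases hp : (count.getD i.toNat 0 == 1) = true
    · have hstep :
        (if count.getD i.toNat 0 == 1 then
            if ((u.length : Int)) + 1 == 1 then (PySem.List.insert (u ++ r) 0 i, ((u.length : Int)) + 1)
            else (PySem.List.insert (u ++ r) (((u.length : Int)) + 1 - 1) i, ((u.length : Int)) + 1)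
          else ((u ++ r) ++ [i], (u.length : Int)))
          = ((u ++ [i]) ++ r, ((u ++ [i]).length : Int)) := by
        rw [if_pos hp]
        by_cases hu : u = []
        · subst hu; simp [PySem.List.insert_zero]
        · have hlen : u.length ≠ 0 := by simpa using hu
          have h1 : (((u.length : Int)) + 1 == 1) = false := by
            simp only [beq_eq_false_iff_ne, ne_eq]; omega
          rw [h1, if_neg (by simp)]
          have h2 : ((u.length : Int)) + 1 - 1 = ((u.length : Nat) : Int) := by omega
          rw [h2, PySem.List.insert_natCast (u ++ r) u.length i (by simp)]
          simp
      rw [hstep, ih (u ++ [i]) r,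
          List.filter_cons_of_pos (p := fun c : Char => count.getD c.toNat 0 == 1) hp,
          List.filter_cons_of_neg (p := fun c : Char => !(count.getD c.toNat 0 == 1)) (by simpa using hp)]
      refine Prod.ext ?_ ?_
      · simp
      · simp; omega
    · have hp' : (count.getD i.toNat 0 == 1) = false := by simpa using hp
      have hstep :
        (if count.getD i.toNat 0 == 1 then
            if ((u.length : Int)) + 1 == 1 then (PySem.List.insert (u ++ r) 0 i, ((u.length : Int)) + 1)
            else (PySem.List.insert (u ++ r) (((u.length : Int)) + 1 - 1) i, ((u.length : Int)) + 1)
          else ((u ++ r) ++ [i], (u.length : Int)))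
          = (u ++ (r ++ [i]), (u.length : Int)) := by
        rw [hp']; simp
      rw [hstep, ih u (r ++ [i]),
          List.filter_cons_of_neg (p := fun c : Char => count.getD c.toNat 0 == 1) hp,
          List.filter_cons_of_pos (p := fun c : Char => !(count.getD c.toNat 0 == 1)) (by simpa using hp')]
      refine Prod.ext ?_ ?_
      · simp
      · simp

-- ===== VERDICT (by name: the statement is the Claim_ definition above) =====
theorem reorder_string_spec : Claim_equal_reorder_string := by
  intro s hs
  unfold Spec_reorder_string
  have h := loopA_partition (get_char_count_array s) s.toList [] []
  simp only [List.nil_append, List.append_nil, List.length_nil, Nat.zero_add, Nat.cast_zero] at h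
  have hA : reorder_string s
      = String.ofList (s.toList.filter (fun c => (get_char_count_array s).getD c.toNat 0 == 1)
          ++ s.toList.filter (fun c => !((get_char_count_array s).getD c.toNat 0 == 1))) := by
    show String.ofList ((s.toList.foldl (fun (st : List Char × Int) i =>
        if (get_char_count_array s).getD i.toNat 0 == 1 then
          if st.2 + 1 == 1 then (PySem.List.insert st.1 0 i, st.2 + 1)
          else (PySem.List.insert st.1 (st.2 + 1 - 1) i, st.2 + 1)
        else (st.1 ++ [i], st.2)) ([], 0)).1) = _
    rw [h]
  have e1 : s.toList.filter (fun c => (get_char_count_array s).getD c.toNat 0 == 1)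
      = s.toList.filter (fun c =>
          (s.toList.foldl (fun (d : PySem.Dict Char Int) c => d.insert c (d.getD c 0 + 1))
            PySem.Dict.empty).getD c 0 == 1) :=
    List.filter_congr (fun c hc => by rw [counts_agree s hs c hc])
  have e2 : s.toList.filter (fun c => !((get_char_count_array s).getD c.toNat 0 == 1))
      = s.toList.filter (fun c =>
          (s.toList.foldl (fun (d : PySem.Dict Char Int) c => d.insert c (d.getD c 0 + 1))
            PySem.Dict.empty).getD c 0 != 1) :=
    List.filter_congr (fun c hc => by rw [counts_agree s hs c hc]; rfl)
  rw [hA, e1, e2]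
  rfl
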